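-- pv_equiv track=rewrite | github.com/Afcooper/Trivia_Discord_Bot | Classes/question_class.py | create_answer_list
-- ===== SOURCE A (Python) =====
-- def create_answer_list(answers_dict: dict):
--     answer1, answer2, answer3, answer4 = [], [], [], []
--     for user, answer in answers_dict.items():
--         if answer == 1:
--             answer1.append(user)
--         elif answer == 2:
--             answer2.append(user)
--         elif answer == 3:
--             answer3.append(user)
--         elif answer == 4:
--             answer4.append(user)
--     return [answer1, answer2, answer3, answer4]
-- ===== SOURCE B (Python) =====
-- def create_answer_list(answers_dict: dict):
--     return [[u for u, a in answers_dict.items() if a == i] for i in range(1, 5)]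
-- ===== Notes on version B (the rewrite author's own statement) =====
-- stated objective: idiomatic
-- what changed: Replaces the single-pass if/elif bucketing into four mutable accumulator lists with four independent filtering scans, one per answer value 1-4, expressed as a nested comprehension.
import Mathlib
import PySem

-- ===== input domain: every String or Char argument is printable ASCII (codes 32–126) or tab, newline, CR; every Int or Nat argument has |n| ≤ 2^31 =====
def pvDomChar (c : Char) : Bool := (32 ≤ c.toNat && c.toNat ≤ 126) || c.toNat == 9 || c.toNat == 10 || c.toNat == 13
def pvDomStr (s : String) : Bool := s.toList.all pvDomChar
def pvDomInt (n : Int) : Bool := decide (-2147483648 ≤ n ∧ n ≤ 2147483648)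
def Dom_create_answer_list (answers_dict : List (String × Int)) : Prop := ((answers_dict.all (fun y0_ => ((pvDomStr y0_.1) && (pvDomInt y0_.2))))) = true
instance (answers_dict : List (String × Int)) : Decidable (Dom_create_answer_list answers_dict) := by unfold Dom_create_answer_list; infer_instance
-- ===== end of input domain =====

-- B replaces A's single-pass if/elif bucketing with four independent filtering scans (more idiomatic); return values proved equal.


-- ===== PORT A =====
-- one pass: four accumulators, if/elif dispatch per (user, answer) item
def create_answer_list_step (st : List String × List String × List String × List String)
    (p : String × Int) : List String × List String × List String × List String :=
  let (a1, a2, a3, a4) := st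
  if p.2 = 1 then (a1 ++ [p.1], a2, a3, a4)
  else if p.2 = 2 then (a1, a2 ++ [p.1], a3, a4)
  else if p.2 = 3 then (a1, a2, a3 ++ [p.1], a4)
  else if p.2 = 4 then (a1, a2, a3, a4 ++ [p.1])
  else (a1, a2, a3, a4)

def create_answer_list (answers_dict : List (String × Int)) : List (List String) :=
  let st := answers_dict.foldl create_answer_list_step ([], [], [], [])
  [st.1, st.2.1, st.2.2.1, st.2.2.2]

-- ===== PORT B =====
-- four scans: for each i in range(1,5), the users whose answer equals i
def create_answer_list_alt (answers_dict : List (String × Int)) : List (List String) :=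
  (PySem.List.pyRange 1 5 1).map
    (fun i => (answers_dict.filter (fun p => p.2 == i)).map Prod.fst)

-- ===== PRECONDITION & SPEC =====
def Spec_create_answer_list (answers_dict : List (String × Int)) (out : List (List String)) : Prop := out = create_answer_list_alt answers_dict
instance (answers_dict : List (String × Int)) (out : List (List String)) : Decidable (Spec_create_answer_list answers_dict out) := by unfold Spec_create_answer_list; infer_instance

-- ===== CLAIM (what is proved, stated in full; the proofs are below) =====
def Claim_equal_create_answer_list : Prop := ∀ (answers_dict : List (String × Int)), Dom_create_answer_list answers_dict → Spec_create_answer_list answers_dict (create_answer_list answers_dict)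

-- ===== LEMMAS AND PROOFS =====

-- invariant of A's fold: each accumulator is its seed followed by the bucket filter
theorem create_answer_list_fold_eq (xs : List (String × Int))
    (a1 a2 a3 a4 : List String) :
    xs.foldl create_answer_list_step (a1, a2, a3, a4) =
      (a1 ++ (xs.filter (fun p => p.2 == 1)).map Prod.fst,
       a2 ++ (xs.filter (fun p => p.2 == 2)).map Prod.fst,
       a3 ++ (xs.filter (fun p => p.2 == 3)).map Prod.fst,
       a4 ++ (xs.filter (fun p => p.2 == 4)).map Prod.fst) := by
  induction xs generalizing a1 a2 a3 a4 with
  | nil => simp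
  | cons p xs ih =>
    simp only [List.foldl_cons, create_answer_list_step]
    by_cases h1 : p.2 = 1
    · simp [h1, ih, List.filter_cons]
    · by_cases h2 : p.2 = 2
      · simp [h1, h2, ih, List.filter_cons]
      · by_cases h3 : p.2 = 3
        · simp [h1, h2, h3, ih, List.filter_cons]
        · by_cases h4 : p.2 = 4
          · simp [h1, h2, h3, h4, ih, List.filter_cons]
          · simp [h1, h2, h3, h4, ih, List.filter_cons]

-- ===== VERDICT (by name: the statement is the Claim_ definition above) =====
theorem create_answer_list_spec : Claim_equal_create_answer_list := by
  intro xs _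
  unfold Spec_create_answer_list create_answer_list create_answer_list_alt
  rw [create_answer_list_fold_eq]
  have : PySem.List.pyRange 1 5 1 = [1, 2, 3, 4] := by decide
  simp [this]
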